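-- pv_equiv track=rewrite | github.com/seancheick/PharmaGuide_Pipeline | scripts/tests/test_cross_compound_alias_guard.py | _identifiers_match
-- ===== SOURCE A (Python) =====
-- def _identifiers_match(a: tuple, b: tuple) -> bool:
--     """Two identifier tuples represent same compound iff at least one
--     identifier matches (CUI or PubChem CID or UNII) AND no two non-None
--     identifiers conflict."""
--     matches = 0
--     for ai, bi in zip(a, b):
--         if ai and bi:
--             if ai == bi:
--                 matches += 1
--             else:
--                 return False  # conflicting identifier = different compound
--     return matches > 0
-- ===== SOURCE B (Python) =====
-- def _identifiers_match(a: tuple, b: tuple) -> bool: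
--     """Two identifier tuples represent same compound iff at least one
--     identifier matches AND no two non-None identifiers conflict."""
--     conflict = any(ai and bi and ai != bi for ai, bi in zip(a, b))
--     matched = any(ai and bi and ai == bi for ai, bi in zip(a, b))
--     return matched and not conflict
-- ===== Notes on version B (the rewrite author's own statement) =====
-- stated objective: simpler
-- what changed: Replaced the single early-return loop with a mutable match counter by two independent declarative passes over zip(a, b) (conflict-anywhere and match-anywhere predicates) combined as 'matched and not conflict'.
import Mathlib
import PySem

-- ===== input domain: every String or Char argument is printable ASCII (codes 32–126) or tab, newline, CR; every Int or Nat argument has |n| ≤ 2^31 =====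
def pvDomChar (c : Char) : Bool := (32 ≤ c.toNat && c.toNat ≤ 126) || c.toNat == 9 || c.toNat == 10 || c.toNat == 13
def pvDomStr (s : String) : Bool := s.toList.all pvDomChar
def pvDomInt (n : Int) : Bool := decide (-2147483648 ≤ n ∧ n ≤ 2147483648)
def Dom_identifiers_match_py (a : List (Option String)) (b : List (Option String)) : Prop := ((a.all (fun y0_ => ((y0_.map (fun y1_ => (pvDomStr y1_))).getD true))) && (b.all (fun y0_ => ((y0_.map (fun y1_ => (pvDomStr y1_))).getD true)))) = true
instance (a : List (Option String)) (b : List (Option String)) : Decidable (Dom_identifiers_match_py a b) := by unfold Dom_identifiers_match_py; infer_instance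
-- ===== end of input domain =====

-- B replaces A's early-return loop with a mutable match counter by two independent
-- declarative any-passes over zip(a, b) (objective: simpler).

-- Python truthiness of an Optional[str]: None and "" are falsy.
def pvTruthy (o : Option String) : Bool :=
  match o with
  | none => false
  | some s => s != ""

-- ===== PORT A =====
-- A's loop over zip(a, b) carrying the 'matches' counter, with early return False on conflict.
def pvLoopA : List (Option String × Option String) → Int → Bool
  | [], m => decide (0 < m)
  | (ai, bi) :: rest, m =>
    if pvTruthy ai && pvTruthy bi then
      if ai == bi then pvLoopA rest (m + 1) else false
    else pvLoopA rest m

def identifiers_match_py (a : List (Option String)) (b : List (Option String)) : Bool :=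
  pvLoopA (a.zip b) 0

-- ===== PORT B =====
def identifiers_match_py_alt (a : List (Option String)) (b : List (Option String)) : Bool :=
  let conflict := (a.zip b).any (fun p => pvTruthy p.1 && pvTruthy p.2 && p.1 != p.2)
  let matched := (a.zip b).any (fun p => pvTruthy p.1 && pvTruthy p.2 && p.1 == p.2)
  matched && !conflict

-- ===== PRECONDITION & SPEC =====
def Spec_identifiers_match_py (a : List (Option String)) (b : List (Option String)) (out : Bool) : Prop := out = identifiers_match_py_alt a b
instance (a : List (Option String)) (b : List (Option String)) (out : Bool) : Decidable (Spec_identifiers_match_py a b out) := by unfold Spec_identifiers_match_py; infer_instance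

-- ===== CLAIM (what is proved, stated in full; the proofs are below) =====
def Claim_equal_identifiers_match_py : Prop := ∀ (a : List (Option String)) (b : List (Option String)), Dom_identifiers_match_py a b → Spec_identifiers_match_py a b (identifiers_match_py a b)

-- ===== LEMMAS AND PROOFS =====

-- Invariant: A's loop equals (counter already positive OR a match ahead) AND no conflict ahead.
theorem pvLoopA_eq (ps : List (Option String × Option String)) :
    ∀ m : Int, 0 ≤ m →
      pvLoopA ps m =
        ((decide (0 < m) || ps.any (fun p => pvTruthy p.1 && pvTruthy p.2 && p.1 == p.2)) &&
          !(ps.any (fun p => pvTruthy p.1 && pvTruthy p.2 && p.1 != p.2))) := by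
  induction ps with
  | nil => intro m _; simp [pvLoopA]
  | cons p rest ih =>
    intro m hm
    obtain ⟨ai, bi⟩ := p
    by_cases ht : (pvTruthy ai && pvTruthy bi) = true
    · by_cases he : (ai == bi) = true
      · have h1 : (0:Int) ≤ m + 1 := by omega
        have hpos : decide (0 < m + 1) = true := by simp; omega
        simp [pvLoopA, ht, he, ih (m + 1) h1, bne]
        exact fun _ => Or.inl hm
      · simp [pvLoopA, ht, he, List.any_cons, bne]
    · simp only [pvLoopA, ht, List.any_cons, ih m hm]
      rcases Bool.eq_false_or_eq_true (pvTruthy ai) with h | h <;>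
        rcases Bool.eq_false_or_eq_true (pvTruthy bi) with h' | h' <;>
          simp_all

-- ===== VERDICT (by name: the statement is the Claim_ definition above) =====
theorem identifiers_match_py_spec : Claim_equal_identifiers_match_py := by
  intro a b _
  unfold Spec_identifiers_match_py identifiers_match_py identifiers_match_py_alt
  rw [pvLoopA_eq (a.zip b) 0 le_rfl]
  simp
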